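-- pv_equiv track=rewrite | github.com/jaimiles23/Multiplication-Medley | 1_code/aux_utils/list_to_speech.py | get_str_from_list
-- ===== SOURCE A (Python) =====
-- def get_str_from_list(message_list: list, cc: str = "and", punct: bool = True) -> str:
--     """Returns list as a formatted string for speech.
--
--     message list: [list] of the components to be joined.
--     cc: [str] coordinating conjunction to place at end of list.
--     punct: bool - indicates if should include punctuation at end of list.
--     """
--     speech_list = []
--
--     if not message_list:
--         return ''
--     elif len(message_list) == 1:
--         message = str(message_list[0])
--         if punct:
--             message += "."
--         return message
--
--     for i in range(len(message_list)):
--         if i == len(message_list) - 1: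
--             speech_list.append(' and ')
--
--         speech_list.append( str(message_list[i]))
--         if i != len(message_list) - 1:
--             speech_list.append(', ')
--
--     if punct:
--         speech_list.append('.')
--     return ''.join(speech_list)
-- ===== SOURCE B (Python) =====
-- def get_str_from_list(message_list: list, cc: str = "and", punct: bool = True) -> str:
--     """Returns list as a formatted string for speech (slice-join formulation)."""
--     if not message_list:
--         return ''
--     if len(message_list) == 1:
--         return str(message_list[0]) + ('.' if punct else '')
--     body = ', '.join(str(x) for x in message_list[:-1]) + ',  and ' + str(message_list[-1])
--     return body + '.' if punct else body
-- ===== Notes on version B (the rewrite author's own statement) =====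
-- stated objective: simpler
-- what changed: Replaces the index-driven loop with per-iteration position tests (appending ' and ' / ', ' conditionally per index) by a single slice-join of all but the last element plus one fixed ', and ' conjunction and the last element.
import Mathlib
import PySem

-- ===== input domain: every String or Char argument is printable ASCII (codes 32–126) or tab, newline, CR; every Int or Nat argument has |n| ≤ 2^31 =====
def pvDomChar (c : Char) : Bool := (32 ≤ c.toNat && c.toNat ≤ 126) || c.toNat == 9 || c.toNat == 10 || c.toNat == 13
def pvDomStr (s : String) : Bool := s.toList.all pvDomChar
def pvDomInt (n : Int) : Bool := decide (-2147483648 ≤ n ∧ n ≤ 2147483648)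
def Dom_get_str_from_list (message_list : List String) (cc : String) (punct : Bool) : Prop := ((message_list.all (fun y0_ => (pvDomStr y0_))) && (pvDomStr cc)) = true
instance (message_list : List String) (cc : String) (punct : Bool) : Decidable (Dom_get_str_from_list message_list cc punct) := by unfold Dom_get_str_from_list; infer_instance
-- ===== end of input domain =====

-- B replaces A's index-driven loop with conditional per-index appends by one slice-join plus a fixed ',  and ' conjunction (simpler decomposition; cc is unused by both).


-- ===== PORT A =====
def get_str_from_list (message_list : List String) (cc : String) (punct : Bool) : String :=
  -- speech_list = []
  if message_list = [] then ""
  else if message_list.length = 1 then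
    let message := PySem.List.pyGetD message_list 0 ""
    let message := if punct then PySem.Str.join "" [message, "."] else message  -- message += "."
    message
  else
    let speech_list := (PySem.List.pyRange 0 message_list.length 1).foldl
      (fun acc i =>
        let acc := if i = (message_list.length : Int) - 1 then acc ++ [" and "] else acc
        let acc := acc ++ [PySem.List.pyGetD message_list i ""]
        if i ≠ (message_list.length : Int) - 1 then acc ++ [", "] else acc)
      ([] : List String)
    let speech_list := if punct then speech_list ++ ["."] else speech_list
    PySem.Str.join "" speech_list

-- ===== PORT B =====
def get_str_from_list_alt (message_list : List String) (cc : String) (punct : Bool) : String :=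
  if message_list = [] then ""
  else if message_list.length = 1 then
    PySem.Str.join "" [PySem.List.pyGetD message_list 0 "", if punct then "." else ""]
  else
    let body := PySem.Str.join ""
      [PySem.Str.join ", " (PySem.List.slice message_list none (some (-1))),
       ",  and ", PySem.List.pyGetD message_list (-1) ""]
    if punct then PySem.Str.join "" [body, "."] else body

-- ===== PRECONDITION & SPEC =====
def Spec_get_str_from_list (message_list : List String) (cc : String) (punct : Bool) (out : String) : Prop := out = get_str_from_list_alt message_list cc punct
instance (message_list : List String) (cc : String) (punct : Bool) (out : String) : Decidable (Spec_get_str_from_list message_list cc punct out) := by unfold Spec_get_str_from_list; infer_instance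

-- ===== CLAIM (what is proved, stated in full; the proofs are below) =====
def Claim_equal_get_str_from_list : Prop := ∀ (message_list : List String) (cc : String) (punct : Bool), Dom_get_str_from_list message_list cc punct → Spec_get_str_from_list message_list cc punct (get_str_from_list message_list cc punct)

-- ===== LEMMAS AND PROOFS =====

-- sep.intercalate on a two-or-more list (unfolded from its definition)
lemma intercalate_two (sep x y : List Char) (ys : List (List Char)) :
    sep.intercalate (x :: y :: ys) = x ++ sep ++ sep.intercalate (y :: ys) := by
  simp [List.intercalate, List.intersperse]

-- [].intercalate is flatten
lemma intercalate_nil_flatten (l : List (List Char)) : [].intercalate l = l.flatten := by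
  induction l with
  | nil => rfl
  | cons x xs ih =>
      cases xs with
      | nil => simp [List.intercalate]
      | cons y ys => rw [intercalate_two]; simp at ih ⊢; simp [ih]

-- joining each element followed by ', ' equals the ', '-join plus one trailing ', ' (stated
-- in the simp normal form the final goal takes; T is the ' and <last>[.]' tail)
lemma flat_comma (xs : List String) (x : String) (T : List Char) :
    x.toList ++ ',' :: ' ' :: ((List.map String.toList (List.flatMap (fun s => [s, ", "]) xs)).flatten ++ ' ' :: 'a' :: 'n' :: 'd' :: ' ' :: T)
      = [',', ' '].intercalate (x.toList :: List.map String.toList xs) ++ ',' :: ' ' :: ' ' :: 'a' :: 'n' :: 'd' :: ' ' :: T := by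
  induction xs generalizing x with
  | nil => simp [List.intercalate]
  | cons y ys ih =>
      have hc : (", " : String).toList = [',', ' '] := rfl
      simp only [List.map_cons, List.flatMap_cons, List.flatten_cons,
        List.append_assoc, List.cons_append, List.nil_append, hc]
      rw [ih y, intercalate_two]
      simp only [List.append_assoc, List.cons_append, List.nil_append]

-- A's loop, characterised: all but the last element each followed by ', ', then ' and ' and the last element
lemma loopA (ml : List String) (h : 2 ≤ ml.length) (hne : ml ≠ []) :
    (PySem.List.pyRange 0 ml.length 1).foldl
      (fun acc i =>
        let acc := if i = (ml.length : Int) - 1 then acc ++ [" and "] else acc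
        let acc := acc ++ [PySem.List.pyGetD ml i ""]
        if i ≠ (ml.length : Int) - 1 then acc ++ [", "] else acc)
      ([] : List String)
      = (ml.dropLast.flatMap fun s => [s, ", "]) ++ [" and ", ml.getLast hne] := by
  have hsplit : PySem.List.pyRange 0 ml.length 1
      = PySem.List.pyRange 0 ((ml.length : Int) - 1) 1 ++ PySem.List.pyRange ((ml.length : Int) - 1) ml.length 1 :=
    PySem.List.pyRange_one_append 0 ((ml.length : Int) - 1) ml.length (by omega) (by omega)
  have hlast : PySem.List.pyRange ((ml.length : Int) - 1) ml.length 1 = [(ml.length : Int) - 1] := by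
    rw [show ((ml.length : Int)) = ((ml.length : Int) - 1) + 1 by ring]
    simp [pysem]
  rw [hsplit, List.foldl_append, hlast]
  have hcongr : (PySem.List.pyRange 0 ((ml.length : Int) - 1) 1).foldl
      (fun acc i =>
        let acc := if i = (ml.length : Int) - 1 then acc ++ [" and "] else acc
        let acc := acc ++ [PySem.List.pyGetD ml i ""]
        if i ≠ (ml.length : Int) - 1 then acc ++ [", "] else acc)
      ([] : List String)
      = (PySem.List.pyRange 0 ((ml.length : Int) - 1) 1).foldl
          (fun acc i => acc ++ [PySem.List.pyGetD ml.dropLast i "", ", "]) ([] : List String) := by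
    apply PySem.List.foldl_congr_mem
    intro acc i hi
    have hb := (PySem.List.mem_pyRange_one).mp hi
    have hne' : i ≠ (ml.length : Int) - 1 := by omega
    have hget : PySem.List.pyGetD ml i "" = PySem.List.pyGetD ml.dropLast i "" := by
      rw [PySem.List.pyGetD_eq_getElem _ _ (by omega) (by omega),
          PySem.List.pyGetD_eq_getElem _ _ (by omega) (by simp; omega)]
      simp [List.getElem_dropLast]
    simp [hne', hget]
  rw [hcongr, PySem.List.foldl_append_eq_flatMap]
  have hlen : ((ml.length : Int) - 1) = ((ml.dropLast.length : Nat) : Int) := by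
    simp [List.length_dropLast]; omega
  have hmapflat : (PySem.List.pyRange 0 ((ml.length : Int) - 1) 1).flatMap
      (fun i => [PySem.List.pyGetD ml.dropLast i "", ", "])
      = ml.dropLast.flatMap fun s => [s, ", "] := by
    rw [hlen]
    have : (PySem.List.pyRange 0 (ml.dropLast.length : Int) 1).flatMap
        (fun i => [PySem.List.pyGetD ml.dropLast i "", ", "])
        = ((PySem.List.pyRange 0 (ml.dropLast.length : Int) 1).map
            (fun i => PySem.List.pyGetD ml.dropLast i "")).flatMap (fun s => [s, ", "]) := by
      simp [List.flatMap_map]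
    rw [this]
    have hlen2 : ((ml.dropLast.length : Nat) : Int) = PySem.List.len ml.dropLast := by
      simp [PySem.List.len]
    rw [hlen2, PySem.List.map_pyGetD_pyRange_zero]
  rw [hmapflat]
  have hgl : PySem.List.pyGetD ml ((ml.length : Int) - 1) "" = ml.getLast hne := by
    rw [PySem.List.pyGetD_eq_getElem _ _ (by omega) (by omega)]
    rw [List.getLast_eq_getElem]
    congr 1
    omega
  have hnot : ¬ ((ml.length : Int) - 1 ≠ (ml.length : Int) - 1) := by simp
  simp only [List.foldl_cons, List.foldl_nil, if_neg hnot, hgl]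
  simp

-- strings are equal when their char lists are
lemma str_ext {a b : String} (h : a.toList = b.toList) : a = b := by
  simpa using congrArg String.ofList h

-- ===== VERDICT (by name: the statement is the Claim_ definition above) =====
theorem get_str_from_list_spec : Claim_equal_get_str_from_list := by
  intro ml cc punct _
  unfold Spec_get_str_from_list get_str_from_list get_str_from_list_alt
  by_cases hnil : ml = []
  · simp [hnil]
  · simp only [if_neg hnil]
    by_cases h1 : ml.length = 1
    · simp only [if_pos h1]
      cases punct <;>
        (apply str_ext; simp [PySem.Chars.join, intercalate_nil_flatten])
    · simp only [if_neg h1]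
      have h2 : 2 ≤ ml.length := by
        have : ml.length ≠ 0 := by simpa using hnil
        omega
      rw [loopA ml h2 hnil]
      have hslice : PySem.List.slice ml none (some (-1)) = ml.dropLast := by simp [pysem]
      have hget : PySem.List.pyGetD ml (-1) "" = ml.getLast hnil := PySem.List.pyGetD_neg_one ml "" hnil
      rw [hslice, hget]
      have hd : ml.dropLast ≠ [] := by
        intro hcontra
        have := congrArg List.length hcontra
        simp [List.length_dropLast] at this
        omega
      obtain ⟨x, xs, hx⟩ := List.exists_cons_of_ne_nil hd
      cases punct <;>
        (apply str_ext
         simp [PySem.Str.join, hx, PySem.Chars.join, intercalate_nil_flatten]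
         exact flat_comma xs x _)
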